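-- pv_equiv track=rewrite | github.com/hth810/pythonlc | 力扣题单/前缀和/你能在你最喜欢的那天吃到你最喜欢的糖果吗？.py | canEat
-- ===== SOURCE A (Python) =====
-- from typing import List
--
-- def canEat(candiesCount: List[int], queries: List[List[int]]) -> List[bool]:
--     n=len(candiesCount)
--     pre=[0]*(n+1)
--     for i in range(1,n+1):
--         pre[i]=candiesCount[i-1]+pre[i-1]
--     res=[]
--     for typ,day,m in queries:
--         tem_m=m*(day+1)
--         tem_l=day+1
--         mi=pre[typ]+1
--         ma=pre[typ]+candiesCount[typ]
--         res.append(tem_l<=ma and tem_m>=mi)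
--     return res
-- ===== SOURCE B (Python) =====
-- from typing import List
--
-- def canEat(candiesCount: List[int], queries: List[List[int]]) -> List[bool]:
--     # No prefix-sum table: each query scans the counts before its type on demand.
--     return [
--         day + 1 <= sum(candiesCount[:typ]) + candiesCount[typ]
--         and m * (day + 1) >= sum(candiesCount[:typ]) + 1
--         for typ, day, m in queries
--     ]
-- ===== Notes on version B (the rewrite author's own statement) =====
-- stated objective: simpler
-- what changed: B drops A's precomputed prefix-sum array and its index-filling loop: each query recomputes the candies eaten before its type by an on-demand slice-and-sum scan inside a single comprehension; Pre_ excludes malformed queries (A raises) and queries with a negative candy type, where A's negative-index wraparound on the length-(n+1) prefix array and B's negative-slice prefix are both accidental and neither value is specified.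
-- outside the precondition, e.g. on canEat([2, 3], [[-1, 6, 10]]): A returns [True], B returns [False]
import Mathlib
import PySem

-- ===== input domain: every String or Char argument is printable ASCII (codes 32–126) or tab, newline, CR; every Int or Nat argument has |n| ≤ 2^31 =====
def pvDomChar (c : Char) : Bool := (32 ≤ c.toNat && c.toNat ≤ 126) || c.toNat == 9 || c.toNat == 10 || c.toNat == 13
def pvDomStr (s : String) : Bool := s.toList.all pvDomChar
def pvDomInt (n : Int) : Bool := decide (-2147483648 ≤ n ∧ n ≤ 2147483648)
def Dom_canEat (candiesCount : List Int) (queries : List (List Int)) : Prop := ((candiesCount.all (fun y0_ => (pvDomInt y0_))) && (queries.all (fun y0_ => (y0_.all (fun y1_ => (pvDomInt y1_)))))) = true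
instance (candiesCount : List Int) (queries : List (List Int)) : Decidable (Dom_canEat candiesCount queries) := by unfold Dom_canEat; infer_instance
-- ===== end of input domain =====

-- B drops the precomputed prefix-sum array and answers each query by an on-demand scan (simpler structure, same results on Pre_).

-- ===== PORT A =====
-- pre[i] = candiesCount[i-1] + pre[i-1] over i in range(1, n+1); i ≥ 1 so `i.toNat` is exact for the assignment index
def canEat (candiesCount : List Int) (queries : List (List Int)) : List Bool :=
  let n := candiesCount.length
  let pre := (PySem.List.pyRange 1 ((n : Int) + 1)).foldl
    (fun pre i =>
      pre.set i.toNat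
        (PySem.List.pyGetD candiesCount (i - 1) 0 + PySem.List.pyGetD pre (i - 1) 0))
    (List.replicate (n + 1) 0)
  queries.foldl
    (fun res q =>
      match q with
      | [typ, day, m] =>
        let temM := m * (day + 1)
        let temL := day + 1
        let mi := PySem.List.pyGetD pre typ 0 + 1
        let ma := PySem.List.pyGetD pre typ 0 + PySem.List.pyGetD candiesCount typ 0
        res ++ [decide (temL ≤ ma) && decide (temM ≥ mi)]
      | _ => res)  -- Python raises ValueError on a query of another arity; excluded by Pre_
    []

-- ===== PORT B =====
-- the comprehension body: one query's answer; the arity guard mirrors the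
-- 'typ, day, m' unpacking (Python raises ValueError on another arity; excluded by Pre_)
def answerQuery (candiesCount : List Int) (q : List Int) : Bool :=
  if q.length = 3 then
    let typ := PySem.List.pyGetD q 0 0
    let day := PySem.List.pyGetD q 1 0
    let m := PySem.List.pyGetD q 2 0
    decide (day + 1 ≤ (PySem.List.slice candiesCount none (some typ)).sum
                      + PySem.List.pyGetD candiesCount typ 0) &&
    decide (m * (day + 1) ≥ (PySem.List.slice candiesCount none (some typ)).sum + 1)
  else false

def canEat_alt (candiesCount : List Int) (queries : List (List Int)) : List Bool :=
  queries.map (answerQuery candiesCount)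

-- ===== PRECONDITION & SPEC =====
-- Pre_ excludes queries of arity ≠ 3 (A raises ValueError) and candy types outside 0 ≤ typ < n:
-- above that range A raises IndexError, and on negative types A's negative-index wraparound on its
-- length-(n+1) prefix array and B's negative-slice prefix are both accidental — neither value is specified.
def Pre_canEat (candiesCount : List Int) (queries : List (List Int)) : Prop :=
  ∀ q ∈ queries, q.length = 3 ∧ 0 ≤ q.headD 0 ∧ q.headD 0 < (candiesCount.length : Int)
instance (candiesCount : List Int) (queries : List (List Int)) : Decidable (Pre_canEat candiesCount queries) := by unfold Pre_canEat; infer_instance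

def pvWitness_canEat : List Int × List (List Int) := ([2, 3, 4], [[0, 1, 1], [1, 5, 2], [2, 8, 1]])

def Spec_canEat (candiesCount : List Int) (queries : List (List Int)) (out : List Bool) : Prop := out = canEat_alt candiesCount queries
instance (candiesCount : List Int) (queries : List (List Int)) (out : List Bool) : Decidable (Spec_canEat candiesCount queries out) := by unfold Spec_canEat; infer_instance

-- ===== CLAIM (what is proved, stated in full; the proofs are below) =====
def Claim_equal_canEat : Prop := ∀ (candiesCount : List Int) (queries : List (List Int)), Dom_canEat candiesCount queries → Pre_canEat candiesCount queries → Spec_canEat candiesCount queries (canEat candiesCount queries)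

-- ===== LEMMAS AND PROOFS =====

-- the prefix-sum array A's first loop builds, in closed form
def preSums (cc : List Int) : List Int :=
  (List.range (cc.length + 1)).map (fun k => ((cc.take k).sum))

-- invariant of A's array-building loop after the iterations i = 1 … m
lemma buildPre_inv (cc : List Int) (m : Nat) (hm : m ≤ cc.length) :
    (PySem.List.pyRange 1 ((m : Int) + 1)).foldl
      (fun pre i =>
        pre.set i.toNat
          (PySem.List.pyGetD cc (i - 1) 0 + PySem.List.pyGetD pre (i - 1) 0))
      (List.replicate (cc.length + 1) 0)
    = (List.range (m + 1)).map (fun k => ((cc.take k).sum))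
      ++ List.replicate (cc.length - m) 0 := by
  induction m with
  | zero =>
    simp [List.replicate_succ]
  | succ m ih =>
    have hm' : m ≤ cc.length := Nat.le_of_succ_le hm
    have hmlt : m < cc.length := hm
    have hcast : ((m + 1 : Nat) : Int) + 1 = ((m : Int) + 1) + 1 := by push_cast; ring
    rw [hcast, PySem.List.pyRange_one_succ_right (by omega : (1 : Int) ≤ (m : Int) + 1),
        List.foldl_append, ih hm']
    simp only [List.foldl_cons, List.foldl_nil]
    have hi1 : ((m : Int) + 1) - 1 = (m : Int) := by ring
    have hi2 : ((m : Int) + 1).toNat = m + 1 := by omega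
    rw [hi1, hi2, PySem.List.pyGetD_natCast, PySem.List.pyGetD_natCast]
    have hlenL : ((List.range (m + 1)).map (fun k => ((cc.take k).sum))).length = m + 1 := by
      simp
    have hgetL : ((List.range (m + 1)).map (fun k => ((cc.take k).sum))
        ++ List.replicate (cc.length - m) 0).getD m 0 = (cc.take m).sum := by
      rw [List.getD_eq_getElem _ 0 (by simp; omega),
          List.getElem_append_left (by omega)]
      simp
    rw [hgetL]
    rw [List.set_append, if_neg (by omega)]
    have hrep : List.replicate (cc.length - m) (0 : Int)
        = 0 :: List.replicate (cc.length - (m + 1)) 0 := by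
      rw [← List.replicate_succ]
      congr 1
      omega
    rw [hrep]
    simp only [hlenL, Nat.sub_self, List.set_cons_zero]
    rw [List.range_succ, List.map_append]
    have hval : (cc.take (m + 1)).sum = cc[m]?.getD 0 + (cc.take m).sum := by
      rw [List.take_add_one, List.sum_append, List.getElem?_eq_getElem hmlt]
      simp [add_comm]
    simp [List.range_succ, hval]

-- the array A builds equals preSums
lemma buildPre_eq (cc : List Int) :
    (PySem.List.pyRange 1 ((cc.length : Int) + 1)).foldl
      (fun pre i =>
        pre.set i.toNat
          (PySem.List.pyGetD cc (i - 1) 0 + PySem.List.pyGetD pre (i - 1) 0))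
      (List.replicate (cc.length + 1) 0)
    = preSums cc := by
  rw [buildPre_inv cc cc.length le_rfl]
  simp [preSums]

-- A's pre[typ] equals B's on-demand prefix sum for every in-range nonnegative candy type
lemma pre_getD (cc : List Int) (t : Int) (h0 : 0 ≤ t) (hlt : t < (cc.length : Int)) :
    PySem.List.pyGetD (preSums cc) t 0 = (PySem.List.slice cc none (some t)).sum := by
  have hk : t = ((t.toNat : Nat) : Int) := by omega
  have hklt : t.toNat < cc.length + 1 := by omega
  rw [hk, PySem.List.pyGetD_natCast]
  unfold preSums
  rw [hk, PySem.List.slice_to_natCast]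
  exact PySem.List.getD_map_range _ _ _ _ hklt

-- A's query loop (over the closed-form array) equals B's map, given Pre_
lemma fold_eq_map (cc : List Int) (qs : List (List Int))
    (h : ∀ q ∈ qs, q.length = 3 ∧ 0 ≤ q.headD 0 ∧ q.headD 0 < (cc.length : Int))
    (acc : List Bool) :
    qs.foldl
      (fun res q =>
        match q with
        | [typ, day, m] =>
          let temM := m * (day + 1)
          let temL := day + 1
          let mi := PySem.List.pyGetD (preSums cc) typ 0 + 1
          let ma := PySem.List.pyGetD (preSums cc) typ 0 + PySem.List.pyGetD cc typ 0
          res ++ [decide (temL ≤ ma) && decide (temM ≥ mi)]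
        | _ => res) acc
    = acc ++ qs.map (answerQuery cc) := by
  induction qs generalizing acc with
  | nil => simp
  | cons q qs ih =>
    obtain ⟨hlen, h0, hlt⟩ := h q (List.mem_cons_self)
    obtain ⟨t, d, m, rfl⟩ : ∃ t d m, q = [t, d, m] := by
      match q, hlen with
      | [t, d, m], _ => exact ⟨t, d, m, rfl⟩
    have hpre : PySem.List.pyGetD (preSums cc) t 0
        = (PySem.List.slice cc none (some t)).sum :=
      pre_getD cc t (by simpa using h0) (by simpa using hlt)
    simp only [List.foldl_cons, List.map_cons]
    rw [ih (fun q hq => h q (List.mem_cons_of_mem _ hq))]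
    simp [answerQuery, PySem.List.pyGetD_ofNat', hpre, List.append_assoc]

-- ===== VERDICT (by name: the statement is the Claim_ definition above) =====
theorem canEat_spec : Claim_equal_canEat := by
  intro candiesCount queries _hdom hpre
  unfold Spec_canEat canEat canEat_alt
  simp only []
  rw [buildPre_eq]
  exact fold_eq_map candiesCount queries hpre []
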